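-- pv_equiv track=rewrite | github.com/Victor-Smirnoff/my_codesignal_solutions_Python | The Core/Increase Number Roundness.py | solution
-- ===== SOURCE A (Python) =====
-- def solution(n):
--     res = []
--     count = 0
--     n = str(n)
--     for i in range(len(n)):
--         if n[i] == '0':
--             count += 1
--             continue
--         else:
--             if count != 0:
--                 res.append(count)
--                 count = 0
--             else:
--                 continue
--
--     return True if len(res) > 0 else False
-- ===== SOURCE B (Python) =====
-- def solution(n):
--     s = str(n).rstrip('0')
--     return '0' in s
-- ===== Notes on version B (the rewrite author's own statement) =====
-- stated objective: simpler
-- what changed: Replaces the state-machine scan with counter and result list by a closed-form string test: strip trailing zeros and check whether any '0' survives.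
import Mathlib
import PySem

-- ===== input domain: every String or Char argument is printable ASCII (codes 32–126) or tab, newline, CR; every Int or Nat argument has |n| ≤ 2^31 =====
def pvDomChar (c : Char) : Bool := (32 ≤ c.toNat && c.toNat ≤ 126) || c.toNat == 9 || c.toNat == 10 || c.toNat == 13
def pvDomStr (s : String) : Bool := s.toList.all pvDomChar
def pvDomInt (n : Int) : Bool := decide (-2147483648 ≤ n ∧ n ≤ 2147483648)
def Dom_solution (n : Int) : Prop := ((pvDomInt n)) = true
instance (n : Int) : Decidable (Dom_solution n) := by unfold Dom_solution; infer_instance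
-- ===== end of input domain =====

-- B replaces A's counter/result-list scan by stripping trailing zeros and testing
-- whether a '0' survives (objective: simpler).

-- ===== PORT A =====
-- the for-loop over str(n), carrying (res, count) exactly as A does
def solutionLoop : List Char → Int → List Int → List Int
  | [], _, res => res
  | c :: rest, count, res =>
    if c = '0' then
      solutionLoop rest (count + 1) res
    else
      if count ≠ 0 then
        solutionLoop rest 0 (res ++ [count])
      else
        solutionLoop rest count res

def solution (n : Int) : Bool :=
  let s := (PySem.Int.toStr n).toList
  let res := solutionLoop s 0 []
  if res.length > 0 then true else false

-- ===== PORT B =====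
-- str.rstrip('0') ported by hand (drop the trailing run of '0' chars): exact,
-- since rstrip('0') removes exactly the maximal trailing run of '0'.
-- '0' in s is single-char substring membership = list membership: exact.
def solution_alt (n : Int) : Bool :=
  let s := (((PySem.Int.toStr n).toList.reverse.dropWhile (fun c => c == '0')).reverse)
  s.contains '0'

-- ===== PRECONDITION & SPEC =====
def Spec_solution (n : Int) (out : Bool) : Prop := out = solution_alt n
instance (n : Int) (out : Bool) : Decidable (Spec_solution n out) := by unfold Spec_solution; infer_instance

-- ===== CLAIM (what is proved, stated in full; the proofs are below) =====
def Claim_equal_solution : Prop := ∀ (n : Int), Dom_solution n → Spec_solution n (solution n)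

-- ===== LEMMAS AND PROOFS =====

-- 'there is a '0' strictly before some non-'0' character'
def hasZeroBeforeNonzero : List Char → Prop
  | [] => False
  | c :: rest => (c = '0' ∧ ∃ x ∈ rest, x ≠ '0') ∨ hasZeroBeforeNonzero rest

-- appending a '0' at the end changes nothing
theorem hzbn_append_zero (l : List Char) :
    hasZeroBeforeNonzero (l ++ ['0']) ↔ hasZeroBeforeNonzero l := by
  induction l with
  | nil => simp [hasZeroBeforeNonzero]
  | cons c rest ih =>
    simp only [List.cons_append, hasZeroBeforeNonzero, ih, List.mem_append, List.mem_cons,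
      List.not_mem_nil, or_false]
    aesop

-- appending a non-'0' at the end: previous witnesses, or any earlier '0'
theorem hzbn_append_nonzero (l : List Char) (a : Char) (ha : a ≠ '0') :
    hasZeroBeforeNonzero (l ++ [a]) ↔ hasZeroBeforeNonzero l ∨ '0' ∈ l := by
  induction l with
  | nil => simp [hasZeroBeforeNonzero]
  | cons c rest ih =>
    simp only [List.cons_append, hasZeroBeforeNonzero, ih, List.mem_append, List.mem_cons,
      List.not_mem_nil, or_false]
    aesop

-- any witness pair in particular contains a '0'
theorem hzbn_mem_zero (l : List Char) (h : hasZeroBeforeNonzero l) : '0' ∈ l := by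
  induction l with
  | nil => exact absurd h (by simp [hasZeroBeforeNonzero])
  | cons d t iht =>
    rcases h with ⟨hd, _⟩ | h
    · exact hd ▸ List.mem_cons_self
    · exact List.mem_cons_of_mem _ (iht h)

-- B's expression characterised: a '0' survives rstrip('0') iff some '0' precedes a non-'0'
theorem rstrip_contains_iff (r : List Char) :
    (((r.dropWhile (fun c => c == '0')).reverse).contains '0' = true)
      ↔ hasZeroBeforeNonzero r.reverse := by
  induction r with
  | nil => simp [hasZeroBeforeNonzero]
  | cons c rest ih =>
    by_cases hc : c = '0'
    · subst hc
      simp only [List.dropWhile_cons, beq_self_eq_true, if_pos, List.reverse_cons]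
      rw [hzbn_append_zero]
      simpa using ih
    · have hbeq : (c == '0') = false := by simpa using hc
      simp only [List.dropWhile_cons, hbeq, if_neg Bool.false_ne_true,
        List.reverse_cons, hzbn_append_nonzero _ _ hc]
      simp only [List.contains_eq_mem, List.mem_append, List.mem_reverse, List.mem_cons,
        List.not_mem_nil, or_false, decide_eq_true_eq]
      constructor
      · rintro (h | h)
        · exact Or.inr h
        · exact absurd h.symm hc
      · rintro (h | h)
        · exact Or.inl (List.mem_reverse.mp (hzbn_mem_zero _ h))
        · exact Or.inl h

-- A's loop characterised
theorem solutionLoop_ne_nil (l : List Char) :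
    ∀ (count : Int) (res : List Int), 0 ≤ count →
      (solutionLoop l count res ≠ [] ↔
        res ≠ [] ∨ (count ≠ 0 ∧ ∃ x ∈ l, x ≠ '0') ∨ hasZeroBeforeNonzero l) := by
  induction l with
  | nil => intro count res _; simp [solutionLoop, hasZeroBeforeNonzero]
  | cons c rest ih =>
    intro count res hcount
    by_cases hc : c = '0'
    · subst hc
      rw [solutionLoop, if_pos rfl, ih _ _ (by omega)]
      have hpos : count + 1 ≠ 0 := by omega
      simp only [hasZeroBeforeNonzero, List.mem_cons]
      constructor
      · rintro (h | ⟨_, x, hx, hne⟩ | h)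
        · exact Or.inl h
        · by_cases hcz : count = 0
          · exact Or.inr (Or.inr (Or.inl ⟨by simp, x, hx, hne⟩))
          · exact Or.inr (Or.inl ⟨hcz, x, Or.inr hx, hne⟩)
        · exact Or.inr (Or.inr (Or.inr h))
      · rintro (h | ⟨_, x, hx | hx, hne⟩ | ⟨_, x, hx, hne⟩ | h)
        · exact Or.inl h
        · exact absurd (hx ▸ rfl) hne
        · exact Or.inr (Or.inl ⟨hpos, x, hx, hne⟩)
        · exact Or.inr (Or.inl ⟨hpos, x, hx, hne⟩)
        · exact Or.inr (Or.inr h)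
    · rw [solutionLoop, if_neg hc]
      by_cases hcz : count = 0
      · rw [if_neg (by simpa using hcz), ih _ _ hcount]
        simp only [hasZeroBeforeNonzero, hcz, List.mem_cons]
        constructor
        · rintro (h | ⟨hne0, _⟩ | h)
          · exact Or.inl h
          · exact absurd rfl hne0
          · exact Or.inr (Or.inr (Or.inr h))
        · rintro (h | ⟨hne0, _⟩ | ⟨hc0, _⟩ | h)
          · exact Or.inl h
          · exact absurd rfl hne0
          · exact absurd hc0 hc
          · exact Or.inr (Or.inr h)
      · rw [if_pos (by simpa using hcz), ih _ _ le_rfl]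
        simp only [hasZeroBeforeNonzero, List.mem_cons]
        constructor
        · intro _
          exact Or.inr (Or.inl ⟨hcz, c, Or.inl rfl, hc⟩)
        · intro _
          exact Or.inl (by simp)
      
theorem solution_spec : Claim_equal_solution := by
  intro n _
  unfold Spec_solution solution solution_alt
  set s := (PySem.Int.toStr n).toList with hs
  have h1 : solutionLoop s 0 [] ≠ [] ↔ hasZeroBeforeNonzero s := by
    rw [solutionLoop_ne_nil s 0 [] le_rfl]
    simp
  have h2 : (((s.reverse.dropWhile (fun c => c == '0')).reverse).contains '0' = true)
      ↔ hasZeroBeforeNonzero s := by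
    simpa using rstrip_contains_iff s.reverse
  have key : ((solutionLoop s 0 []).length > 0) ↔
      (((s.reverse.dropWhile (fun c => c == '0')).reverse).contains '0' = true) := by
    rw [h2, ← h1, gt_iff_lt, List.length_pos_iff]
  by_cases hp : (solutionLoop s 0 []).length > 0
  · rw [if_pos hp]
    exact (key.mp hp).symm
  · rw [if_neg hp]
    have := mt key.mpr hp
    simp only [Bool.not_eq_true] at this
    exact this.symm
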